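-- pv_equiv track=rewrite | github.com/RohitShende/PythonPrograms | interviews/interview.py | get_last_rep_char
-- ===== SOURCE A (Python) =====
-- def get_last_rep_char(s):
--     d = {}
--     last_non_rep = None
--     for i in s:
--         if d.get(i):
--             if last_non_rep == i:
--                 last_non_rep = None
--         else:
--             d[i] = 1
--             last_non_rep = i
--     return last_non_rep
-- ===== SOURCE B (Python) =====
-- def get_last_rep_char(s):
--     if not s:
--         return None
--     c = list(dict.fromkeys(s))[-1]
--     return c if s.count(c) == 1 else None
-- ===== Notes on version B (the rewrite author's own statement) =====
-- stated objective: simpler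
-- what changed: Replaces the single-pass dict/flag state machine with a direct characterization: take the last first-introduced character (ordered dedup via dict.fromkeys) and return it iff it occurs exactly once.
import Mathlib
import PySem

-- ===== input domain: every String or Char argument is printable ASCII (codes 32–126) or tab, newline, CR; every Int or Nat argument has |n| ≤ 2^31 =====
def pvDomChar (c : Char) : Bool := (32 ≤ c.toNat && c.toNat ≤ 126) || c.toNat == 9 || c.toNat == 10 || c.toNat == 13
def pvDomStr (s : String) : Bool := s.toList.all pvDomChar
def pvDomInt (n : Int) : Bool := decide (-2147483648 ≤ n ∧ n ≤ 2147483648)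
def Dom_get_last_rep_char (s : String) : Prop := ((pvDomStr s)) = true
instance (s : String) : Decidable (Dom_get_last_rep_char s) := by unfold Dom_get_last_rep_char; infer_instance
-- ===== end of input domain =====

-- B replaces A's single-pass dict/flag state machine with a direct two-step characterization
-- (last first-introduced character, kept iff it occurs exactly once): simpler, same cost.

-- ===== PORT A =====
-- one loop step: 'if d.get(i): … else: …' (stored values are the int 1; d.get(i) is truthy iff ≠ 0)
def pvStepA (st : PySem.Dict Char Int × Option Char) (i : Char) : PySem.Dict Char Int × Option Char :=
  if ((st.1.get? i).getD 0) ≠ 0 then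
    (if st.2 = some i then (st.1, none) else (st.1, st.2))
  else
    (st.1.insert i 1, some i)

def get_last_rep_char (s : String) : Option String :=
  ((s.toList.foldl pvStepA (PySem.Dict.empty, none)).2).map (fun c => String.ofList [c])

-- ===== PORT B =====
def get_last_rep_char_alt (s : String) : Option String :=
  if s.toList.isEmpty then none
  else
    match PySem.List.pyGet? (PySem.List.dedup s.toList) (-1) with   -- list(dict.fromkeys(s))[-1]
    | none => none            -- unreachable: s nonempty ⇒ dedup nonempty
    | some c => if s.toList.count c = 1 then some (String.ofList [c]) else none

-- ===== PRECONDITION & SPEC =====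
def Spec_get_last_rep_char (s : String) (out : Option String) : Prop := out = get_last_rep_char_alt s
instance (s : String) (out : Option String) : Decidable (Spec_get_last_rep_char s out) := by unfold Spec_get_last_rep_char; infer_instance

-- ===== CLAIM (what is proved, stated in full; the proofs are below) =====
def Claim_equal_get_last_rep_char : Prop := ∀ (s : String), Dom_get_last_rep_char s → Spec_get_last_rep_char s (get_last_rep_char s)

-- ===== LEMMAS AND PROOFS =====

-- the common value both ports compute, on the char-list side
def pvSpecChars (p : List Char) : Option Char :=
  match (PySem.Set.ofList p).getLast? with
  | none => none
  | some c => if p.count c = 1 then some c else none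

-- the two shapes of A's loop step
lemma pvStepA_seen (st : PySem.Dict Char Int × Option Char) (i : Char)
    (h : st.1.get? i = some 1) :
    pvStepA st i = if st.2 = some i then (st.1, none) else (st.1, st.2) := by
  simp [pvStepA, h]

lemma pvStepA_new (st : PySem.Dict Char Int × Option Char) (i : Char)
    (h : st.1.get? i = none) :
    pvStepA st i = (st.1.insert i 1, some i) := by
  simp [pvStepA, h]

lemma pvOfList_ne_nil {p : List Char} (h : p ≠ []) : PySem.Set.ofList p ≠ [] := by
  intro hnil
  cases p with
  | nil => exact h rfl
  | cons a t =>
    have : a ∈ PySem.Set.ofList (a :: t) := (PySem.Set.mem_ofList _ _).mpr (by simp)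
    rw [hnil] at this; exact absurd this (List.not_mem_nil)

lemma pvSpec_append_mem {p : List Char} {i : Char} (hmem : i ∈ p) :
    pvSpecChars (p ++ [i]) = if pvSpecChars p = some i then none else pvSpecChars p := by
  have hp : p ≠ [] := by intro h; subst h; simp at hmem
  have hof : PySem.Set.ofList (p ++ [i]) = PySem.Set.ofList p := by
    rw [PySem.Set.ofList_append_singleton,
      PySem.Set.add_of_mem ((PySem.Set.mem_ofList _ _).mpr hmem)]
  obtain ⟨c, hc⟩ := Option.isSome_iff_exists.mp
    (List.getLast?_isSome.mpr (pvOfList_ne_nil hp))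
  have hcnt : 1 ≤ p.count i := List.one_le_count_iff.mpr hmem
  unfold pvSpecChars
  rw [hof, hc]
  show (if List.count c (p ++ [i]) = 1 then some c else none)
      = if (if List.count c p = 1 then some c else none) = some i then none
        else if List.count c p = 1 then some c else none
  by_cases hci : c = i
  · subst hci
    rw [List.count_append]
    by_cases h1 : p.count c = 1
    · simp [h1]
    · have h0 : List.count c p ≠ 0 := by omega
      simp [h1, h0]
  · have hz : List.count c [i] = 0 :=
      List.count_eq_zero_of_not_mem (by simpa using fun h : c = i => hci h)
    rw [List.count_append, hz, Nat.add_zero]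
    have hne : (if p.count c = 1 then some c else none) ≠ some i := by
      split_ifs <;> simp [hci]
    rw [if_neg hne]

lemma pvSpec_append_not_mem {p : List Char} {i : Char} (hmem : i ∉ p) :
    pvSpecChars (p ++ [i]) = some i := by
  have hof : PySem.Set.ofList (p ++ [i]) = PySem.Set.ofList p ++ [i] := by
    rw [PySem.Set.ofList_append_singleton,
      PySem.Set.add_of_not_mem (fun h => hmem ((PySem.Set.mem_ofList _ _).mp h))]
  unfold pvSpecChars
  rw [hof, List.getLast?_concat]
  simp [List.count_append, List.count_eq_zero_of_not_mem hmem]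

lemma pvFoldA_inv (p : List Char) :
    (∀ k, ((p.foldl pvStepA (PySem.Dict.empty, none)).1.get? k)
        = if k ∈ p then some 1 else none)
    ∧ (p.foldl pvStepA (PySem.Dict.empty, none)).2 = pvSpecChars p := by
  induction p using List.reverseRecOn with
  | nil => constructor <;> simp [PySem.Dict.get?_empty, pvSpecChars]
  | append_singleton p i ih =>
    obtain ⟨hd, hl⟩ := ih
    rw [List.foldl_append, List.foldl_cons, List.foldl_nil]
    by_cases hmem : i ∈ p
    · -- seen before: truthy branch; dict unchanged, flag possibly reset to None
      have hget : ((p.foldl pvStepA (PySem.Dict.empty, none)).1.get? i) = some 1 := by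
        rw [hd i]; simp [hmem]
      rw [pvStepA_seen _ _ hget]
      have hk : ∀ k : Char, (k ∈ p ++ [i]) = (k ∈ p) := by
        intro k
        simp only [List.mem_append, List.mem_singleton, eq_iff_iff]
        exact ⟨fun h => h.elim id (fun h => h ▸ hmem), Or.inl⟩
      constructor
      · intro k
        have h1 : (if (List.foldl pvStepA (PySem.Dict.empty, none) p).2 = some i
            then ((List.foldl pvStepA (PySem.Dict.empty, none) p).1, (none : Option Char))
            else ((List.foldl pvStepA (PySem.Dict.empty, none) p).1,
              (List.foldl pvStepA (PySem.Dict.empty, none) p).2)).1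
            = (List.foldl pvStepA (PySem.Dict.empty, none) p).1 := by
          split_ifs <;> rfl
        rw [h1, hd k]
        simp only [hk k]
      · rw [pvSpec_append_mem hmem, ← hl]
        split_ifs <;> rfl
    · -- new char: else branch
      have hget : ((p.foldl pvStepA (PySem.Dict.empty, none)).1.get? i) = none := by
        rw [hd i]; simp [hmem]
      rw [pvStepA_new _ _ hget]
      constructor
      · intro k
        rw [PySem.Dict.get?_insert, hd k]
        by_cases hk : k = i <;> simp [hk, hmem, List.mem_append]
      · rw [pvSpec_append_not_mem hmem]

lemma pvAltEq (s : String) :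
    get_last_rep_char_alt s = (pvSpecChars s.toList).map (fun c => String.ofList [c]) := by
  unfold get_last_rep_char_alt pvSpecChars
  by_cases h : s.toList = []
  · simp [h]
  · rw [PySem.List.pyGet?_neg_one]
    simp only [List.isEmpty_iff, h, if_false, PySem.List.dedup_eq_ofList]
    cases (PySem.Set.ofList s.toList).getLast? with
    | none => simp
    | some c => by_cases h1 : s.toList.count c = 1 <;> simp [h1]

-- ===== VERDICT (by name: the statement is the Claim_ definition above) =====
theorem get_last_rep_char_spec : Claim_equal_get_last_rep_char := by
  intro s _
  unfold Spec_get_last_rep_char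
  rw [pvAltEq, get_last_rep_char, (pvFoldA_inv s.toList).2]
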